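-- pv_equiv track=rewrite | github.com/kekwait/py_course | py_course_practice/task1.py | carpet
-- ===== SOURCE A (Python) =====
-- def carpet(height: int):
--     width = 3 * height
--     figure = ""
--     for i in range(1, height, 2):
--         figure += ('{:-^' + str(width) + '}').format('.|.' * i) + '\n'
--     figure += ('{:-^' + str(width) + '}').format("welcome") + '\n'
--     for i in range(height - 2, 0, -2):
--         figure += ('{:-^' + str(width) + '}').format('.|.' * i) + '\n'
--     return figure
-- ===== SOURCE B (Python) =====
-- def carpet(height: int):
--     width = 3 * height
--     mid = height // 2
--
--     def line(s):
--         pad = width - len(s)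
--         left = pad // 2
--         return '-' * left + s + '-' * (pad - left)
--
--     def pattern(j):
--         if j == mid:
--             return "welcome"
--         i = 2 * j + 1 if j < mid else height + 2 * mid - 2 * j
--         return '.|.' * i
--
--     return ''.join(line(pattern(j)) + '\n' for j in range(max(height, 1)))
-- ===== Notes on version B (the rewrite author's own statement) =====
-- stated objective: alternative
-- what changed: B replaces A's two accumulating format-loops (top half, then a separate reversed-range bottom loop) by a single closed-form row function indexed by line number over one row range, with centering done by dash arithmetic instead of str.format, joined in one pass.
import Mathlib
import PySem

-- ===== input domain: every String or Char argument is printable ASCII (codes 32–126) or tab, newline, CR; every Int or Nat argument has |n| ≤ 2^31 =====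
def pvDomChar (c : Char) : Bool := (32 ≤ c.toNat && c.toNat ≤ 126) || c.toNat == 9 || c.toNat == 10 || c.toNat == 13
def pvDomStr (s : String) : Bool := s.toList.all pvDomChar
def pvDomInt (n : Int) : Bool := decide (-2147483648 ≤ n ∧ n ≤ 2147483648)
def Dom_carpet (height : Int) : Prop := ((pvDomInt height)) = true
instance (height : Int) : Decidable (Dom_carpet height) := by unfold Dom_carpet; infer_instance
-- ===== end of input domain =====

-- B computes each carpet line by a closed-form row function indexed by line number
-- (centering via dash arithmetic) instead of A's two accumulating format-loops; objective: alternative.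


-- ===== PORT A =====
-- ('{:-^' + str(w) + '}').format(s): center s in width w with '-' fill, extra dash on the right
def fmtCenter (w : Int) (s : List Char) : List Char :=
  let total := (w - (s.length : Int)).toNat
  let left := total / 2
  List.replicate left '-' ++ s ++ List.replicate (total - left) '-'

def carpet (height : Int) : String :=
  let width := 3 * height
  let figure : List Char := []
  let figure := (PySem.List.pyRange 1 height 2).foldl
    (fun acc i => acc ++ (fmtCenter width (PySem.List.pyRepeat ".|.".toList i) ++ ['\n'])) figure
  let figure := figure ++ (fmtCenter width "welcome".toList ++ ['\n'])
  let figure := (PySem.List.pyRange (height - 2) 0 (-2)).foldl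
    (fun acc i => acc ++ (fmtCenter width (PySem.List.pyRepeat ".|.".toList i) ++ ['\n'])) figure
  String.mk figure

-- ===== PORT B =====
-- '-' * left + s + '-' * (pad - left)  ('-' * k is empty for k < 0, hence .toNat)
def altLine (width : Int) (s : List Char) : List Char :=
  let pad := width - (s.length : Int)
  let left := PySem.Int.floordiv pad 2
  List.replicate left.toNat '-' ++ s ++ List.replicate (pad - left).toNat '-'

def altPattern (height mid j : Int) : List Char :=
  if j = mid then "welcome".toList
  else PySem.List.pyRepeat ".|.".toList (if j < mid then 2 * j + 1 else height + 2 * mid - 2 * j)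

def carpet_alt (height : Int) : String :=
  let width := 3 * height
  let mid := PySem.Int.floordiv height 2
  String.mk (((PySem.List.pyRange 0 (max height 1) 1).map
    (fun j => altLine width (altPattern height mid j) ++ ['\n'])).flatten)

-- ===== PRECONDITION & SPEC =====
-- Pre_ excludes height < 0, where A raises ValueError ('Sign not allowed in string format specifier').
def Pre_carpet (height : Int) : Prop := 0 ≤ height
instance (height : Int) : Decidable (Pre_carpet height) := by unfold Pre_carpet; infer_instance
def pvWitness_carpet : Int := (5)

def Spec_carpet (height : Int) (out : String) : Prop := out = carpet_alt height
instance (height : Int) (out : String) : Decidable (Spec_carpet height out) := by unfold Spec_carpet; infer_instance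

-- ===== CLAIM (what is proved, stated in full; the proofs are below) =====
def Claim_equal_carpet : Prop := ∀ (height : Int), Dom_carpet height → Pre_carpet height → Spec_carpet height (carpet height)

-- ===== LEMMAS AND PROOFS =====

-- B's dash-arithmetic centering equals A's format centering on every input
lemma altLine_eq_fmtCenter (w : Int) (s : List Char) : altLine w s = fmtCenter w s := by
  simp only [altLine, fmtCenter]
  rw [PySem.Int.floordiv_eq_ediv_of_pos (by norm_num)]
  have h1 : ((w - (s.length : Int)) / 2).toNat = (w - (s.length : Int)).toNat / 2 := by omega
  have h2 : (w - (s.length : Int) - (w - (s.length : Int)) / 2).toNat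
      = (w - (s.length : Int)).toNat - (w - (s.length : Int)).toNat / 2 := by omega
  rw [h1, h2]

lemma rangeA (n : Nat) :
    PySem.List.pyRange 1 (n : Int) 2 = (List.range (n / 2)).map (fun k => (1 : Int) + 2 * k) := by
  rw [PySem.List.pyRange_of_pos _ _ (by norm_num)]
  have hc : (if (1 : Int) < (n : Int) then (((n : Int) - 1 + 2 - 1) / 2).toNat else 0) = n / 2 := by
    split_ifs with hl <;> omega
  rw [hc]
  simp only [List.pure_def, List.bind_eq_flatMap, ← List.map_eq_flatMap, List.map_map]
  rfl

lemma rangeB (n : Nat) :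
    PySem.List.pyRange ((n : Int) - 2) 0 (-2)
      = (List.range ((n - 1) / 2)).map (fun k => (n : Int) - 2 + (-2) * k) := by
  unfold PySem.List.pyRange
  norm_num
  have hc : (if 2 < n then (((n : Int) - 1) / 2).toNat else 0) = (n - 1) / 2 := by
    split_ifs with hl <;> omega
  rw [hc]
  simp only [← List.map_eq_flatMap, List.map_map]
  rfl

lemma rangeC (n : Nat) :
    PySem.List.pyRange 0 (max (n : Int) 1) 1 = (List.range (max n 1)).map (fun k => (k : Int)) := by
  have h : max (n : Int) 1 = ((max n 1 : Nat) : Int) := by omega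
  rw [h, PySem.List.pyRange_zero_natCast]
  simp only [List.pure_def, List.bind_eq_flatMap, ← List.map_eq_flatMap, List.map_map]
  rfl

lemma carpet_eq_natCast (n : Nat) : carpet (n : Int) = carpet_alt (n : Int) := by
  unfold carpet carpet_alt
  simp only [PySem.List.foldl_append_eq_flatMap, List.nil_append]
  have hmid : PySem.Int.floordiv (n : Int) 2 = ((n / 2 : Nat) : Int) := by
    rw [PySem.Int.floordiv_eq_ediv_of_pos (by norm_num)]; omega
  rw [rangeA, rangeB, rangeC, hmid]
  simp only [List.pure_def, List.bind_eq_flatMap, ← List.map_eq_flatMap, List.flatMap_map,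
    List.map_map]
  rw [← List.flatMap_def]
  have hsplit : max n 1 = n / 2 + 1 + (n - 1) / 2 := by omega
  rw [hsplit, List.range_add, List.range_succ, List.flatMap_append, List.flatMap_append,
    List.flatMap_singleton, List.flatMap_map]
  refine congrArg String.mk ?_
  refine congrArg₂ (· ++ ·) (congrArg₂ (· ++ ·) ?_ ?_) ?_
  · -- top half: rows j = 0 .. n/2 - 1
    rw [List.flatMap_def, List.flatMap_def]
    refine congrArg List.flatten (List.map_congr_left ?_)
    intro k hk
    rw [List.mem_range] at hk
    simp only [Function.comp_apply, altPattern]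
    have hne : ((k : Int)) ≠ ((n / 2 : Nat) : Int) := by exact_mod_cast Nat.ne_of_lt hk
    have hlt : ((k : Int)) < ((n / 2 : Nat) : Int) := by exact_mod_cast hk
    rw [if_neg hne, if_pos hlt, altLine_eq_fmtCenter]
    have harg : (2 : Int) * (k : Int) + 1 = 1 + 2 * (k : Int) := by ring
    rw [harg]
  · -- middle line
    simp only [Function.comp_apply, altPattern]
    rw [if_pos trivial, altLine_eq_fmtCenter]
  · -- bottom half: rows j = n/2 + 1 + k, k = 0 .. (n-1)/2 - 1
    rw [List.flatMap_def, List.flatMap_def]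
    refine congrArg List.flatten (List.map_congr_left ?_)
    intro k hk
    rw [List.mem_range] at hk
    simp only [Function.comp_apply, altPattern]
    have hne : ((n / 2 + 1 + k : Nat) : Int) ≠ ((n / 2 : Nat) : Int) := by push_cast; omega
    have hnlt : ¬ ((n / 2 + 1 + k : Nat) : Int) < ((n / 2 : Nat) : Int) := by push_cast; omega
    rw [if_neg hne, if_neg hnlt, altLine_eq_fmtCenter]
    have harg : (n : Int) + 2 * ((n / 2 : Nat) : Int) - 2 * ((n / 2 + 1 + k : Nat) : Int)
        = (n : Int) - 2 + -2 * (k : Int) := by push_cast; ring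
    rw [harg]

-- ===== VERDICT (by name: the statement is the Claim_ definition above) =====
theorem carpet_spec : Claim_equal_carpet := by
  intro height _ hpre
  have h : height = ((height.toNat : Nat) : Int) := (Int.toNat_of_nonneg hpre).symm
  unfold Spec_carpet
  rw [h, carpet_eq_natCast]
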